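-- pv_equiv track=rewrite | github.com/rix0rrr/gcl | gcl/ast.py | find_offset
-- ===== SOURCE A (Python) =====
-- def find_offset(s, line, col):
--   c_line = 1
--   c_col = 1
--   for i in range(len(s)):
--     if (c_line == line and c_col >= col) or c_line > line:
--       return i
--     if s[i] == '\n':
--       c_col = 1
--       c_line += 1
--     else:
--       c_col += 1
--   return len(s)
-- ===== SOURCE B (Python) =====
-- def find_offset(s, line, col):
--   offset = 0
--   segs = s.split('\n')
--   last = len(segs) - 1
--   for idx, seg in enumerate(segs):
--     c_line = idx + 1
--     if c_line > line:
--       return offset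
--     line_len = len(seg) + (0 if idx == last else 1)
--     if c_line == line:
--       return offset + max(0, min(col - 1, line_len))
--     offset += line_len
--   return offset
-- ===== Notes on version B (the rewrite author's own statement) =====
-- stated objective: faster
-- what changed: B splits the string into lines once and walks whole line segments with a running offset, computing the clamped column arithmetically, instead of A's character-by-character cursor that tracks (line, col) per character.
import Mathlib
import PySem

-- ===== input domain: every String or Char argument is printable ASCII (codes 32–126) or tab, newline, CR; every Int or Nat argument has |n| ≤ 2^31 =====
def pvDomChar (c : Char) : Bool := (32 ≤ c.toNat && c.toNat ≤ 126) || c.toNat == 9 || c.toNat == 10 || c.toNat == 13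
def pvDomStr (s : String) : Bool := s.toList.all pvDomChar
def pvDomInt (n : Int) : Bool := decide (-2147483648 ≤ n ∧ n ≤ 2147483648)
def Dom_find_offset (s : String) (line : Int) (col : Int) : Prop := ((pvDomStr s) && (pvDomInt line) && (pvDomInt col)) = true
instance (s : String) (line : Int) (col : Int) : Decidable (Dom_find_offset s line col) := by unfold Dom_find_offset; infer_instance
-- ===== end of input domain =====

-- B replaces A's character-by-character (line, col) cursor by one split on '\n' plus a
-- segment walk with a running offset and an arithmetic clamp of the column (measured faster: the split is one pass instead of a per-character Python loop).

-- ===== PORT A =====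
-- the for-loop of A: state (i, c_line, c_col); n = len(s), returned when the loop runs out
def find_offset_go (cs : List Char) (i c_line c_col line col n : Int) : Int :=
  match cs with
  | [] => n
  | c :: rest =>
    if (c_line = line ∧ c_col ≥ col) ∨ c_line > line then i
    else if c = '\n' then find_offset_go rest (i + 1) (c_line + 1) 1 line col n
    else find_offset_go rest (i + 1) c_line (c_col + 1) line col n

def find_offset (s : String) (line : Int) (col : Int) : Int :=
  find_offset_go s.toList 0 1 1 line col (s.toList.length : Int)

-- ===== PORT B =====
-- the for-loop of B over enumerate(segs): state (idx, offset); `last` = len(segs) - 1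
def find_offset_alt_go (segs : List (List Char)) (idx last : Nat) (offset line col : Int) : Int :=
  match segs with
  | [] => offset
  | seg :: rest =>
    let c_line : Int := (idx : Int) + 1
    if c_line > line then offset
    else
      let line_len : Int := (seg.length : Int) + (if idx = last then 0 else 1)
      if c_line = line then offset + max 0 (min (col - 1) line_len)
      else find_offset_alt_go rest (idx + 1) last (offset + line_len) line col

def find_offset_alt (s : String) (line : Int) (col : Int) : Int :=
  let segs := PySem.Chars.splitOn s.toList ['\n']   -- s.split('\n')
  find_offset_alt_go segs 0 (segs.length - 1) 0 line col

-- ===== PRECONDITION & SPEC =====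
def Spec_find_offset (s : String) (line : Int) (col : Int) (out : Int) : Prop := out = find_offset_alt s line col
instance (s : String) (line : Int) (col : Int) (out : Int) : Decidable (Spec_find_offset s line col out) := by unfold Spec_find_offset; infer_instance

-- ===== CLAIM (what is proved, stated in full; the proofs are below) =====
def Claim_equal_find_offset : Prop := ∀ (s : String) (line : Int) (col : Int), Dom_find_offset s line col → Spec_find_offset s line col (find_offset s line col)

-- ===== LEMMAS AND PROOFS =====

/-- proof-side model of `s.split('\n')`, structural on the char list -/
def splitNl : List Char → List (List Char)
  | [] => [[]]
  | c :: tl =>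
    if c = '\n' then [] :: splitNl tl
    else
      match splitNl tl with
      | [] => [[c]]
      | s :: ss => (c :: s) :: ss

theorem splitNl_ne_nil (cs : List Char) : splitNl cs ≠ [] := by
  induction cs with
  | nil => simp [splitNl]
  | cons c tl ih =>
    simp only [splitNl]
    split
    · simp
    · cases h : splitNl tl <;> simp

/-- `PySem.Chars.splitOn.go ['\n']` with enough fuel computes `splitNl`, prefixing the
    accumulated current chunk onto the head segment. -/
theorem splitOn_go_nl (fuel : Nat) :
    ∀ (l cur : List Char) (acc : List (List Char)), l.length < fuel →
      PySem.Chars.splitOn.go ['\n'] fuel l cur acc =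
        acc.reverse ++ (match splitNl l with
                        | [] => []
                        | s :: ss => (cur.reverse ++ s) :: ss) := by
  induction fuel with
  | zero => intro l cur acc h; omega
  | succ fuel ih =>
    intro l cur acc h
    cases l with
    | nil => simp [PySem.Chars.splitOn.go, splitNl]
    | cons c rest =>
      by_cases hc : c = '\n'
      · subst hc
        have hp : List.isPrefixOf ['\n'] ('\n' :: rest) = true := by
          simp [List.isPrefixOf]
        rw [PySem.Chars.splitOn.go, if_pos hp]
        simp only [List.length_cons, List.length_nil, List.drop_succ_cons, List.drop_zero]
        simp only [List.length_cons] at h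
        rw [ih rest [] (cur.reverse :: acc) (by omega)]
        have := splitNl_ne_nil rest
        cases hs : splitNl rest with
        | nil => exact absurd hs this
        | cons s ss => simp [splitNl, hs]
      · have hp : List.isPrefixOf ['\n'] (c :: rest) = false := by
          simp [List.isPrefixOf]; exact fun h => absurd h.symm hc
        rw [PySem.Chars.splitOn.go, if_neg (by simp [hp])]
        simp only [List.length_cons] at h
        rw [ih rest (c :: cur) acc (by omega)]
        have := splitNl_ne_nil rest
        cases hs : splitNl rest with
        | nil => exact absurd hs this
        | cons s ss => simp [splitNl, hs, hc]

theorem splitOn_nl_eq (cs : List Char) :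
    PySem.Chars.splitOn cs ['\n'] = splitNl cs := by
  rw [PySem.Chars.splitOn, splitOn_go_nl (cs.length + 1) cs [] [] (by omega)]
  have := splitNl_ne_nil cs
  cases hs : splitNl cs with
  | nil => exact absurd hs this
  | cons s ss => simp

/-- decomposition of a char list along its first newline -/
theorem splitNl_cases (cs : List Char) :
    ('\n' ∉ cs ∧ splitNl cs = [cs]) ∨
    (∃ pre tl, cs = pre ++ '\n' :: tl ∧ '\n' ∉ pre ∧ splitNl cs = pre :: splitNl tl) := by
  induction cs with
  | nil => left; simp [splitNl]
  | cons c tl ih =>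
    by_cases hc : c = '\n'
    · subst hc
      right; exact ⟨[], tl, by simp [splitNl]⟩
    · rcases ih with ⟨hmem, hs⟩ | ⟨pre, tl', heq, hmem, hs⟩
      · left
        constructor
        · simp only [List.mem_cons, not_or]
          exact ⟨fun h => hc h.symm, hmem⟩
        · simp [splitNl, hc, hs]
      · right
        refine ⟨c :: pre, tl', by simp [heq], ?_, ?_⟩
        · simp only [List.mem_cons, not_or]
          exact ⟨fun h => hc h.symm, hmem⟩
        simp only [splitNl, if_neg hc, hs]

-- ---- behaviour of A's loop on a single segment ----

/-- past the target line, A returns the current index (needs i + |cs| = n for the empty case) -/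
theorem goA_past (cs : List Char) (i c_line c_col line col n : Int)
    (hinv : i + cs.length = n) (h : c_line > line) :
    find_offset_go cs i c_line c_col line col n = i := by
  cases cs with
  | nil => simp at hinv; simp [find_offset_go, hinv]
  | cons c rest => rw [find_offset_go, if_pos (Or.inr h)]

/-- on the target line, segment followed by a newline: arithmetic clamp -/
theorem goA_line_mid (seg : List Char) :
    ∀ (rest : List Char) (i c_col line col n : Int), '\n' ∉ seg →
      i + 1 + seg.length + rest.length = n →
      find_offset_go (seg ++ '\n' :: rest) i line c_col line col n =
        i + max 0 (min (col - c_col) ((seg.length : Int) + 1)) := by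
  induction seg with
  | nil =>
    intro rest i c_col line col n _ hinv
    simp only [List.nil_append]
    rw [find_offset_go]
    by_cases h : c_col ≥ col
    · rw [if_pos (Or.inl ⟨rfl, h⟩)]; simp only [List.length_nil, List.length_cons]; push_cast; omega
    · rw [if_neg (by simp; omega), if_pos rfl]
      rw [goA_past rest (i + 1) (line + 1) 1 line col n (by simp only [List.length_nil, List.length_cons] at hinv ⊢; push_cast at hinv ⊢; omega) (by omega)]
      simp only [List.length_nil, List.length_cons]; push_cast; omega
  | cons c tl ih =>
    intro rest i c_col line col n hmem hinv
    simp only [List.cons_append]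
    rw [find_offset_go]
    have hc : c ≠ '\n' := by simp at hmem; tauto
    by_cases h : c_col ≥ col
    · rw [if_pos (Or.inl ⟨rfl, h⟩)]; simp only [List.length_nil, List.length_cons]; push_cast; omega
    · rw [if_neg (by simp; omega), if_neg hc]
      rw [ih rest (i + 1) (c_col + 1) line col n (by simp at hmem; tauto)
            (by simp only [List.length_nil, List.length_cons] at hinv ⊢; push_cast at hinv ⊢; omega)]
      simp only [List.length_nil, List.length_cons]; push_cast; omega

/-- on the target line, final segment (no newline after): clamp at the segment length -/
theorem goA_line_last (seg : List Char) :
    ∀ (i c_col line col n : Int), '\n' ∉ seg → i + seg.length = n →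
      find_offset_go seg i line c_col line col n =
        i + max 0 (min (col - c_col) (seg.length : Int)) := by
  induction seg with
  | nil =>
    intro i c_col line col n _ hinv
    simp at hinv; simp [find_offset_go, hinv]
  | cons c tl ih =>
    intro i c_col line col n hmem hinv
    rw [find_offset_go]
    have hc : c ≠ '\n' := by simp at hmem; tauto
    by_cases h : c_col ≥ col
    · rw [if_pos (Or.inl ⟨rfl, h⟩)]; simp only [List.length_nil, List.length_cons]; push_cast; omega
    · rw [if_neg (by simp; omega), if_neg hc]
      rw [ih (i + 1) (c_col + 1) line col n (by simp at hmem; tauto)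
            (by simp only [List.length_nil, List.length_cons] at hinv ⊢; push_cast at hinv ⊢; omega)]
      simp only [List.length_nil, List.length_cons]; push_cast; omega

/-- before the target line, A walks a whole (newline-terminated) segment without returning -/
theorem goA_skip (seg : List Char) :
    ∀ (rest : List Char) (i c_line c_col line col n : Int), '\n' ∉ seg → c_line < line →
      find_offset_go (seg ++ '\n' :: rest) i c_line c_col line col n =
        find_offset_go rest (i + seg.length + 1) (c_line + 1) 1 line col n := by
  induction seg with
  | nil =>
    intro rest i c_line c_col line col n _ hl
    simp only [List.nil_append]
    rw [find_offset_go, if_neg (by simp; omega), if_pos rfl]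
    norm_num
  | cons c tl ih =>
    intro rest i c_line c_col line col n hmem hl
    simp only [List.cons_append]
    have hc : c ≠ '\n' := by simp at hmem; tauto
    rw [find_offset_go, if_neg (by simp; omega), if_neg hc]
    rw [ih rest (i + 1) c_line (c_col + 1) line col n (by simp at hmem; tauto) hl]
    simp only [List.length_cons]; push_cast; ring_nf

/-- before the target line, a final segment (no newline) runs the loop out: A returns n -/
theorem goA_skip_last (seg : List Char) :
    ∀ (i c_line c_col line col n : Int), '\n' ∉ seg → c_line < line →
      find_offset_go seg i c_line c_col line col n = n := by
  induction seg with
  | nil => intro i c_line c_col line col n _ _; rfl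
  | cons c tl ih =>
    intro i c_line c_col line col n hmem hl
    have hc : c ≠ '\n' := by simp at hmem; tauto
    rw [find_offset_go, if_neg (by simp; omega), if_neg hc]
    exact ih (i + 1) c_line (c_col + 1) line col n (by simp at hmem; tauto) hl

theorem splitNl_length_pos (cs : List Char) : 0 < (splitNl cs).length :=
  List.length_pos_of_ne_nil (splitNl_ne_nil cs)

/-- main bridge: A's char loop from the start of line (idx+1) equals B's segment loop -/
theorem main_bridge (m : Nat) : ∀ (cs : List Char), cs.length = m → ∀ (idx last : Nat) (i line col n : Int),
    i + cs.length = n → last = idx + ((splitNl cs).length - 1) →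
    find_offset_go cs i ((idx : Int) + 1) 1 line col n =
      find_offset_alt_go (splitNl cs) idx last i line col := by
  induction m using Nat.strong_induction_on with
  | _ m IH =>
  intro cs hm idx last i line col n hinv hlast
  rcases splitNl_cases cs with ⟨hmem, hs⟩ | ⟨pre, tl, heq, hmem, hs⟩
  · -- one segment, no newline
    rw [hs]
    rw [hs] at hlast
    simp at hlast
    rw [find_offset_alt_go]
    rcases lt_trichotomy ((idx : Int) + 1) line with h | h | h
    · rw [if_neg (by omega), if_neg (by omega)]
      rw [goA_skip_last cs i ((idx : Int) + 1) 1 line col n hmem h]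
      simp [find_offset_alt_go, hlast]
      omega
    · rw [if_neg (by omega), if_pos h]
      rw [h] at *
      rw [goA_line_last cs i 1 line col n hmem hinv]
      simp [hlast]
    · rw [if_pos h]
      exact goA_past cs i ((idx : Int) + 1) 1 line col n hinv h
  · -- segment, newline, remainder
    rw [hs]
    rw [hs] at hlast
    have hne := splitNl_ne_nil tl
    have hlen := splitNl_length_pos tl
    have hidx : idx ≠ last := by
      simp only [List.length_cons] at hlast; omega
    rw [find_offset_alt_go]
    rcases lt_trichotomy ((idx : Int) + 1) line with h | h | h
    · rw [if_neg (by omega), if_neg (by omega)]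
      rw [heq, goA_skip pre tl i ((idx : Int) + 1) 1 line col n hmem h]
      simp only [if_neg hidx]
      have htl : tl.length < m := by
        subst hm; rw [heq]; simp only [List.length_append, List.length_cons]; omega
      have := IH tl.length htl tl rfl (idx + 1) last (i + pre.length + 1) line col n
        (by rw [heq] at hinv; simp only [List.length_append, List.length_cons] at hinv; push_cast at hinv ⊢; omega)
        (by simp only [List.length_cons] at hlast; omega)
      push_cast at this
      rw [show i + ((pre.length : Int) + 1) = i + (pre.length : Int) + 1 from by ring]
      exact this
    · rw [if_neg (by omega), if_pos h]
      rw [h] at *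
      rw [heq, goA_line_mid pre tl i 1 line col n hmem
            (by rw [heq] at hinv; simp only [List.length_append, List.length_cons] at hinv; push_cast at hinv ⊢; omega)]
      simp only [if_neg hidx]
    · rw [if_pos h]
      exact goA_past cs i ((idx : Int) + 1) 1 line col n hinv h

-- ===== VERDICT (by name: the statement is the Claim_ definition above) =====
theorem find_offset_spec : Claim_equal_find_offset := by
  intro s line col _
  unfold Spec_find_offset find_offset find_offset_alt
  rw [splitOn_nl_eq]
  have := main_bridge s.toList.length s.toList rfl 0 ((splitNl s.toList).length - 1) 0 line col
    (s.toList.length : Int) (by omega) (by omega)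
  simpa using this
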